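-- pv_equiv track=rewrite | github.com/1quantlogistics-ship-it/MAGNET | magnet/routing/router/path_utils.py | get_path_segments
-- ===== SOURCE A (Python) =====
-- from typing import List, Dict, Set, Optional, Tuple, Any
--
-- def get_path_segments(
--     path: List[str],
--     segment_boundaries: Set[str],
-- ) -> List[List[str]]:
--     """
--     Split path into segments at boundary nodes.
--
--     Args:
--         path: Path to split
--         segment_boundaries: Set of nodes that define segment boundaries
--
--     Returns:
--         List of path segments
--     """
--     if not path:
--         return []
--
--     segments = []
--     current_segment = [path[0]]
--
--     for node in path[1:]:
--         current_segment.append(node)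
--         if node in segment_boundaries:
--             segments.append(current_segment)
--             current_segment = [node]
--
--     if len(current_segment) > 1 or (segments and current_segment[0] != segments[-1][-1]):
--         segments.append(current_segment)
--
--     return segments
-- ===== SOURCE B (Python) =====
-- def get_path_segments(path, segment_boundaries):
--     if not path:
--         return []
--     # Stage 1: find all boundary positions (index 0 never splits).
--     idxs = [i for i in range(1, len(path)) if path[i] in segment_boundaries]
--     # Stage 2: cut the path with overlapping slices at those positions.
--     segments = []
--     start = 0
--     for i in idxs:
--         segments.append(path[start:i + 1])
--         start = i
--     tail = path[start:]
--     if len(tail) > 1: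
--         segments.append(tail)
--     return segments
-- ===== Notes on version B (the rewrite author's own statement) =====
-- stated objective: alternative
-- what changed: B first computes the list of boundary indices, then cuts the path into overlapping slices at those indices with a uniform 'keep the tail only if longer than 1' rule, instead of A's single accumulator loop with a special trailing-segment test whose inequality clause is dead code.
import Mathlib
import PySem

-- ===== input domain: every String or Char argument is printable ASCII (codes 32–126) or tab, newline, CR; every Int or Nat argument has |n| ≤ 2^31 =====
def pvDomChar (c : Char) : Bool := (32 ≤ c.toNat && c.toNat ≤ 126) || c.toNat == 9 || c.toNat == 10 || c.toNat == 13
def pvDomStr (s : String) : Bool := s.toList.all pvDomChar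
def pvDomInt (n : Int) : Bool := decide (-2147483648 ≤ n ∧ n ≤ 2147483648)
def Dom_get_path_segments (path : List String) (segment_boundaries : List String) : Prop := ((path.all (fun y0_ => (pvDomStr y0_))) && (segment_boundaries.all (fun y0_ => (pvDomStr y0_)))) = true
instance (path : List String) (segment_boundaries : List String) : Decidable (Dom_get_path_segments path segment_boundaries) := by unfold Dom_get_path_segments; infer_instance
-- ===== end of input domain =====

-- B computes the boundary indices first and then cuts the path into overlapping slices
-- at those indices, instead of A's single accumulator loop with a trailing-segment test;
-- same output, same cost (objective: alternative decomposition).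

-- ===== PORT A =====
-- loop body of A's 'for node in path[1:]'
def pvAStep (sbs : List String) (st : List (List String) × List String) (node : String) :
    List (List String) × List String :=
  let cur := st.2 ++ [node]
  if sbs.contains node then (st.1 ++ [cur], [node]) else (st.1, cur)

def get_path_segments (path : List String) (segment_boundaries : List String) :
    List (List String) :=
  match path with
  | [] => []
  | p0 :: rest =>
    let st := rest.foldl (pvAStep segment_boundaries) ([], [p0])
    -- 'if len(current_segment) > 1 or (segments and current_segment[0] != segments[-1][-1])'
    if 1 < st.2.length ∨ (st.1 ≠ [] ∧
        PySem.List.pyGet? st.2 0 ≠ (PySem.List.pyGet? st.1 (-1)).bind (fun s => PySem.List.pyGet? s (-1)))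
    then st.1 ++ [st.2] else st.1

-- ===== PORT B =====
-- body of B's 'for i in idxs: segments.append(path[start:i+1]); start = i'
def pvBStep (path : List String) (st : List (List String) × Int) (i : Int) :
    List (List String) × Int :=
  (st.1 ++ [PySem.List.slice path (some st.2) (some (i + 1))], i)

def get_path_segments_alt (path : List String) (segment_boundaries : List String) :
    List (List String) :=
  if path = [] then [] else
  -- 'idxs = [i for i in range(1, len(path)) if path[i] in segment_boundaries]'
  -- (every i produced by the range is in bounds, so path[i] is pyGetD with an unused default)
  let idxs := (PySem.List.pyRange 1 path.length 1).filter
      (fun i => segment_boundaries.contains (PySem.List.pyGetD path i ""))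
  let st := idxs.foldl (pvBStep path) ([], 0)
  let tail := PySem.List.slice path (some st.2) none
  if 1 < tail.length then st.1 ++ [tail] else st.1

-- ===== PRECONDITION & SPEC =====
def Spec_get_path_segments (path : List String) (segment_boundaries : List String) (out : List (List String)) : Prop := out = get_path_segments_alt path segment_boundaries
instance (path : List String) (segment_boundaries : List String) (out : List (List String)) : Decidable (Spec_get_path_segments path segment_boundaries out) := by unfold Spec_get_path_segments; infer_instance

-- ===== CLAIM =====
def Claim_equal_get_path_segments : Prop := ∀ (path : List String) (segment_boundaries : List String), Dom_get_path_segments path segment_boundaries → Spec_get_path_segments path segment_boundaries (get_path_segments path segment_boundaries)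

-- ===== LEMMAS AND PROOFS =====

-- common forward characterization of the segment split
def pvSpec (sbs : List String) : List String → List String → List (List String)
  | cur, [] => if 1 < cur.length then [cur] else []
  | cur, n :: rest =>
      if sbs.contains n then (cur ++ [n]) :: pvSpec sbs [n] rest
      else pvSpec sbs (cur ++ [n]) rest

-- A's loop + final test equals the forward characterization
theorem pvA_loop (sbs : List String) (rest : List String) :
    ∀ (S : List (List String)) (C : List String), C ≠ [] →
    (S ≠ [] → PySem.List.pyGet? C 0 =
      (PySem.List.pyGet? S (-1)).bind (fun s => PySem.List.pyGet? s (-1))) →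
    (let st := rest.foldl (pvAStep sbs) (S, C);
     if 1 < st.2.length ∨ (st.1 ≠ [] ∧
        PySem.List.pyGet? st.2 0 ≠ (PySem.List.pyGet? st.1 (-1)).bind (fun s => PySem.List.pyGet? s (-1)))
     then st.1 ++ [st.2] else st.1)
    = S ++ pvSpec sbs C rest := by
  induction rest with
  | nil =>
    intro S C hC hinv
    simp only [List.foldl, pvSpec]
    by_cases hlen : 1 < C.length
    · simp [hlen]
    · have hfalse : ¬ (1 < C.length ∨ (S ≠ [] ∧
          PySem.List.pyGet? C 0 ≠ (PySem.List.pyGet? S (-1)).bind (fun s => PySem.List.pyGet? s (-1)))) := by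
        intro h
        rcases h with h | ⟨hS, hne⟩
        · exact hlen h
        · exact hne (hinv hS)
      rw [if_neg hfalse, if_neg hlen]
      simp
  | cons n rest ih =>
    intro S C hC hinv
    simp only [List.foldl, pvSpec, pvAStep]
    by_cases hb : sbs.contains n
    · simp only [hb, if_true]
      rw [ih (S ++ [C ++ [n]]) [n] (by simp) (by
        intro _
        simp [PySem.List.pyGet?_neg_one_append_singleton])]
      simp
    · simp only [hb, Bool.false_eq_true, if_false]
      have hhead : PySem.List.pyGet? (C ++ [n]) 0 = PySem.List.pyGet? C 0 := by
        cases C with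
        | nil => exact absurd rfl hC
        | cons c cs => simp [PySem.List.pyGet?_zero_cons]
      exact ih S (C ++ [n]) (by simp) (fun hS => by rw [hhead]; exact hinv hS)

-- B's fold appends to the segment accumulator, so a nonempty initial accumulator factors out
theorem pvB_prefix (path : List String) (l : List Int) :
    ∀ (S : List (List String)) (a : Int),
    l.foldl (pvBStep path) (S, a)
      = (S ++ (l.foldl (pvBStep path) ([], a)).1, (l.foldl (pvBStep path) ([], a)).2) := by
  induction l with
  | nil => intro S a; simp
  | cons i l ih =>
    intro S a
    simp only [List.foldl_cons, pvBStep, List.nil_append]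
    rw [ih (S ++ [PySem.List.slice path (some a) (some (i + 1))]) i,
        ih [PySem.List.slice path (some a) (some (i + 1))] i]
    simp

-- the tail-cut computation that B performs after the boundary-index fold, starting the
-- current segment at position t with the scan at position s
def pvBRun (sbs path : List String) (t s : Nat) : List (List String) :=
  let idxs := (PySem.List.pyRange ((s : Int) + 1) (path.length : Int) 1).filter
      (fun i => sbs.contains (PySem.List.pyGetD path i ""))
  let st := idxs.foldl (pvBStep path) ([], (t : Int))
  let tail := PySem.List.slice path (some st.2) none
  if 1 < tail.length then st.1 ++ [tail] else st.1

-- B's staged computation equals the forward characterization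
theorem pvB_run (sbs path : List String) :
    ∀ (d t s : Nat), path.length - s - 1 ≤ d → t ≤ s → s < path.length →
    pvBRun sbs path t s
      = pvSpec sbs ((path.drop t).take (s + 1 - t)) (path.drop (s + 1)) := by
  intro d
  induction d with
  | zero =>
    intro t s hd ht hs
    have hlen : path.length = s + 1 := by omega
    unfold pvBRun
    rw [hlen]
    rw [PySem.List.pyRange_one_eq_nil (by push_cast; omega)]
    simp only [List.filter_nil, List.foldl_nil]
    rw [PySem.List.slice_from_natCast]
    have hdrop : path.drop (s + 1) = [] := by
      apply List.drop_eq_nil_of_le; omega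
    have htake : (path.drop t).take (s + 1 - t) = path.drop t := by
      apply List.take_of_length_le; simp; omega
    rw [hdrop, htake]
    simp [pvSpec]
  | succ d ih =>
    intro t s hd ht hs
    by_cases hlast : path.length = s + 1
    · -- same as the base case: the range is empty
      unfold pvBRun
      rw [hlast, PySem.List.pyRange_one_eq_nil (by push_cast; omega)]
      simp only [List.filter_nil, List.foldl_nil]
      rw [PySem.List.slice_from_natCast]
      have hdrop : path.drop (s + 1) = [] := by
        apply List.drop_eq_nil_of_le; omega
      have htake : (path.drop t).take (s + 1 - t) = path.drop t := by
        apply List.take_of_length_le; simp; omega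
      rw [hdrop, htake]
      simp [pvSpec]
    · have hs1 : s + 1 < path.length := by omega
      have hcons : PySem.List.pyRange ((s : Int) + 1) (path.length : Int) 1
          = ((s : Int) + 1) :: PySem.List.pyRange ((s : Int) + 1 + 1) (path.length : Int) 1 := by
        exact PySem.List.pyRange_one_cons (by omega)
      have hgetD : PySem.List.pyGetD path ((s : Int) + 1) "" = path[s + 1] := by
        have : ((s : Int) + 1) = ((s + 1 : Nat) : Int) := by push_cast; ring
        rw [this, PySem.List.pyGetD_natCast, List.getD_eq_getElem _ _ hs1]
      have hdropcons : path.drop (s + 1) = path[s + 1] :: path.drop (s + 1 + 1) :=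
        List.drop_eq_getElem_cons hs1
      -- the current segment extended by path[s+1]
      have hseg : (path.drop t).take (s + 1 - t) ++ [path[s + 1]]
          = (path.drop t).take (s + 1 + 1 - t) := by
        have h1 : s + 1 + 1 - t = (s + 1 - t) + 1 := by omega
        have h2 : (path.drop t)[s + 1 - t]? = some path[s + 1] := by
          rw [List.getElem?_drop]
          rw [List.getElem?_eq_getElem (by omega)]
          congr 1
          congr 1
          omega
        rw [h1, List.take_add_one, h2]
        rfl
      unfold pvBRun
      rw [hcons, List.filter_cons, hgetD]
      by_cases hb : sbs.contains path[s + 1]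
      · -- boundary at s+1: one segment is cut, the rest is pvBRun at (s+1, s+1)
        simp only [hb, if_true]
        simp only [List.foldl_cons, pvBStep, List.nil_append]
        rw [pvB_prefix]
        have hslice : PySem.List.slice path (some (t : Int)) (some ((s : Int) + 1 + 1))
            = (path.drop t).take (s + 1 + 1 - t) := by
          have : (s : Int) + 1 + 1 = ((s + 1 + 1 : Nat) : Int) := by push_cast; ring
          rw [this, PySem.List.slice_natCast]
        have hrun := ih (s + 1) (s + 1) (by omega) (le_refl _) hs1
        unfold pvBRun at hrun
        simp only at hrun
        have h1 : s + 1 + 1 - (s + 1) = 1 := by omega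
        rw [h1] at hrun
        rw [show List.take 1 (path.drop (s + 1)) = [path[s + 1]] from by
          rw [hdropcons]; rfl] at hrun
        have hint : ((s : Int) + 1) = ((s + 1 : Nat) : Int) := by push_cast; ring
        rw [hint] at hslice
        simp only [hint]
        -- forward side
        rw [hdropcons]
        simp only [pvSpec, hb, if_true]
        rw [hseg, ← hslice, ← hrun]
        split <;> simp
      · -- no boundary at s+1: same fold, segment grows by one node
        simp only [hb, Bool.false_eq_true, if_false]
        have hrun := ih t (s + 1) (by omega) (by omega) hs1
        unfold pvBRun at hrun
        simp only at hrun
        have hint : ((s : Int) + 1 + 1) = ((s + 1 : Nat) : Int) + 1 := by push_cast; ring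
        rw [hint]
        rw [hrun]
        rw [hdropcons]
        simp only [pvSpec, hb, Bool.false_eq_true, if_false]
        rw [hseg]

theorem get_path_segments_eq (path : List String) (sbs : List String) :
    get_path_segments path sbs = get_path_segments_alt path sbs := by
  cases path with
  | nil => rfl
  | cons p0 rest =>
    have hA := pvA_loop sbs rest [] [p0] (by simp) (by simp)
    have hB := pvB_run sbs (p0 :: rest) (rest.length) 0 0 (by simp) (le_refl _) (by simp)
    unfold pvBRun at hB
    simp only [Nat.cast_zero, zero_add, Nat.sub_zero, List.take_succ_cons, List.take_zero,
      List.drop_succ_cons, List.drop_zero] at hB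
    simp only [get_path_segments, get_path_segments_alt]
    rw [if_neg (List.cons_ne_nil p0 rest)]
    simp only at hA ⊢
    rw [hA, List.nil_append, hB]

-- ===== VERDICT =====
theorem get_path_segments_spec : Claim_equal_get_path_segments := by
  intro path sbs _
  unfold Spec_get_path_segments
  exact get_path_segments_eq path sbs
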